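-- pv_equiv track=rewrite | github.com/SaturnFX/MEGA-for-Python | MEGA/Account.py | _GetFileChunks
-- ===== SOURCE A (Python) =====
-- def _GetFileChunks(FileSize):
--     ChunkStart = 0
--     ChunkSize = 0x20000
--     while ChunkStart + ChunkSize < FileSize:
--         yield(ChunkStart, ChunkSize)
--         ChunkStart = ChunkStart + ChunkSize
--         if ChunkSize < 0x100000:
--             ChunkSize = ChunkSize + 0x20000
--     yield(ChunkStart, FileSize - ChunkStart)
-- ===== SOURCE B (Python) =====
-- # Closed-form boundary table: no running chunk-size state at all.
-- # Ramp-phase interior boundaries are the fixed triangular offsets 0x20000*k*(k+1)//2 (k=1..8),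
-- # the steady-phase boundary count is computed arithmetically, and chunks are pairwise
-- # differences of consecutive boundaries.
-- _RAMP = [0x20000, 0x60000, 0xC0000, 0x140000, 0x1E0000, 0x2A0000, 0x380000, 0x480000]
--
-- def _GetFileChunks(FileSize):
--     bounds = [0] + [b for b in _RAMP if b < FileSize]
--     if FileSize > 0x480000:
--         n = (FileSize - 0x480001) // 0x100000
--         bounds += [0x480000 + 0x100000 * (j + 1) for j in range(n)]
--     for a, b in zip(bounds, bounds[1:]):
--         yield (a, b - a)
--     yield (bounds[-1], FileSize - bounds[-1])
-- ===== Notes on version B (the rewrite author's own statement) =====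
-- stated objective: alternative
-- what changed: B removes A's stateful chunk-size loop entirely: it builds the list of chunk boundary offsets directly (a fixed table of the 8 triangular ramp offsets filtered against FileSize, plus an arithmetically computed count of steady 0x100000 boundaries) and emits chunks as pairwise differences of consecutive boundaries.
import Mathlib
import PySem

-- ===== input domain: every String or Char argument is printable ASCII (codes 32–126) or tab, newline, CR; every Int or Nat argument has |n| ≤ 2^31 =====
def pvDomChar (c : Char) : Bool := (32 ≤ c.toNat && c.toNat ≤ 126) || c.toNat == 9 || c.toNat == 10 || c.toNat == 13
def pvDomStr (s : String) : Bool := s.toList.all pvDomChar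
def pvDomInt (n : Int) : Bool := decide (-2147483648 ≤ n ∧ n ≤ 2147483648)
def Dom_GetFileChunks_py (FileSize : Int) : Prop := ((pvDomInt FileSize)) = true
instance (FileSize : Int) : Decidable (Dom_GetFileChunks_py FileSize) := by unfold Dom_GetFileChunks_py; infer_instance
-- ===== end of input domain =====

-- B replaces A's stateful chunk-size loop by a boundary-offset table (fixed triangular ramp
-- offsets filtered against FileSize plus an arithmetically counted steady tail), emitting
-- chunks as pairwise differences of consecutive boundaries; objective: alternative.

-- ===== PORT A =====
-- A's while loop: state (ChunkStart, ChunkSize); the proof argument only witnesses termination.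
def pvALoop (FileSize ChunkStart ChunkSize : Int) (h : 0x20000 ≤ ChunkSize) : List (Int × Int) :=
  if ChunkStart + ChunkSize < FileSize then
    (ChunkStart, ChunkSize) ::
      pvALoop FileSize (ChunkStart + ChunkSize)
        (if ChunkSize < 0x100000 then ChunkSize + 0x20000 else ChunkSize)
        (by split <;> omega)
  else [(ChunkStart, FileSize - ChunkStart)]
termination_by (FileSize - ChunkStart).toNat
decreasing_by omega

def GetFileChunks_py (FileSize : Int) : List (Int × Int) :=
  pvALoop FileSize 0 0x20000 (by omega)

-- ===== PORT B =====
-- the module-level table _RAMP of Source B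
def pvRAMP : List Int := [0x20000, 0x60000, 0xC0000, 0x140000, 0x1E0000, 0x2A0000, 0x380000, 0x480000]

def GetFileChunks_py_alt (FileSize : Int) : List (Int × Int) :=
  -- bounds = [0] + [b for b in _RAMP if b < FileSize]
  let bounds0 : List Int := 0 :: pvRAMP.filter (fun b => decide (b < FileSize))
  -- if FileSize > 0x480000: bounds += [0x480000 + 0x100000*(j+1) for j in range(n)]
  let bounds : List Int :=
    if 0x480000 < FileSize then
      bounds0 ++ (PySem.List.pyRange 0 (PySem.Int.floordiv (FileSize - 0x480001) 0x100000) 1).map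
        (fun j => 0x480000 + 0x100000 * (j + 1))
    else bounds0
  -- for a, b in zip(bounds, bounds[1:]): yield (a, b - a)   (bounds[1:] = drop 1, exact here)
  -- final: yield (bounds[-1], FileSize - bounds[-1]); bounds is nonempty by construction,
  -- so bounds[-1] is its last element (getD's default is never used).
  (bounds.zip (bounds.drop 1)).map (fun p => (p.1, p.2 - p.1)) ++
    [(bounds.getLast?.getD 0, FileSize - bounds.getLast?.getD 0)]

-- ===== PRECONDITION & SPEC =====
def Spec_GetFileChunks_py (FileSize : Int) (out : List (Int × Int)) : Prop := out = GetFileChunks_py_alt FileSize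
instance (FileSize : Int) (out : List (Int × Int)) : Decidable (Spec_GetFileChunks_py FileSize out) := by unfold Spec_GetFileChunks_py; infer_instance

-- ===== CLAIM (what is proved, stated in full; the proofs are below) =====
def Claim_equal_GetFileChunks_py : Prop := ∀ (FileSize : Int), Dom_GetFileChunks_py FileSize → Spec_GetFileChunks_py FileSize (GetFileChunks_py FileSize)

-- ===== LEMMAS AND PROOFS =====

theorem pvALoop_step {FileSize ChunkStart ChunkSize : Int} {h : 0x20000 ≤ ChunkSize}
    (hc : ChunkStart + ChunkSize < FileSize) :
    pvALoop FileSize ChunkStart ChunkSize h =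
      (ChunkStart, ChunkSize) ::
        pvALoop FileSize (ChunkStart + ChunkSize)
          (if ChunkSize < 0x100000 then ChunkSize + 0x20000 else ChunkSize) (by split <;> omega) := by
  rw [pvALoop, if_pos hc]

theorem pvALoop_stop {FileSize ChunkStart ChunkSize : Int} {h : 0x20000 ≤ ChunkSize}
    (hc : ¬ ChunkStart + ChunkSize < FileSize) :
    pvALoop FileSize ChunkStart ChunkSize h = [(ChunkStart, FileSize - ChunkStart)] := by
  rw [pvALoop, if_neg hc]

-- canonical steady boundary progression (proof-only helper)
def pvSL (cs : Int) (n : Nat) : List Int := (List.range n).map (fun (k : Nat) => cs + 1048576 * ((k : Int) + 1))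

theorem pvSL_succ (cs : Int) (n : Nat) : pvSL cs (n + 1) = (cs + 1048576) :: pvSL (cs + 1048576) n := by
  unfold pvSL
  rw [List.range_succ_eq_map]
  simp only [List.map_cons, List.map_map, Nat.cast_zero, zero_add, mul_one, List.cons.injEq]
  exact ⟨trivial, List.map_congr_left fun k _ => by simp [Function.comp]; ring⟩

-- steady phase of A: with the size pinned at 0x100000 and n full chunks remaining
theorem pvALoop_steady (FileSize : Int) : ∀ (n : Nat) (cs : Int),
    cs + 1048576 * n < FileSize → FileSize ≤ cs + 1048576 * (n + 1) →
    pvALoop FileSize cs 1048576 (by omega) =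
      (List.range n).map (fun (j : Nat) => ((cs + 1048576 * (j : Int) : Int), (1048576 : Int))) ++
        [(cs + 1048576 * n, FileSize - (cs + 1048576 * n))] := by
  intro n
  induction n with
  | zero =>
    intro cs h1 h2
    rw [pvALoop_stop (by push_cast at h2 ⊢; omega)]
    simp
  | succ n ih =>
    intro cs h1 h2
    rw [pvALoop_step (by push_cast at h1 ⊢; omega)]
    norm_num
    rw [ih (cs + 1048576) (by push_cast at h1 ⊢; omega) (by push_cast at h2 ⊢; omega),
      List.range_succ_eq_map]
    simp only [List.map_cons, List.map_map, Nat.cast_zero, mul_zero, add_zero, List.cons_append,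
      List.cons.injEq]
    refine ⟨trivial, ?_⟩
    congr 1
    · exact (List.map_congr_left fun j _ => by simp [Function.comp, Prod.ext_iff]; ring).symm
    · simp [Prod.ext_iff]; ring

-- pairwise differences over the steady boundary progression
theorem pvZipSteady : ∀ (n : Nat) (cs : Int),
    (((cs :: pvSL cs n).zip (pvSL cs n)).map (fun p : Int × Int => (p.1, p.2 - p.1))) =
      (List.range n).map (fun (j : Nat) => ((cs + 1048576 * (j : Int) : Int), (1048576 : Int))) := by
  intro n
  induction n with
  | zero => intro cs; simp [pvSL]
  | succ n ih =>
    intro cs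
    rw [pvSL_succ]
    simp only [List.zip_cons_cons, List.map_cons]
    rw [ih (cs + 1048576), List.range_succ_eq_map]
    simp only [List.map_cons, List.map_map, Nat.cast_zero, mul_zero, add_zero, List.cons.injEq]
    refine ⟨by norm_num, ?_⟩
    exact List.map_congr_left fun j _ => by simp [Function.comp, Prod.ext_iff]; ring

theorem pvLastSteady : ∀ (n : Nat) (cs : Int),
    ((cs :: pvSL cs n).getLast?.getD 0) = cs + 1048576 * n := by
  intro n
  induction n with
  | zero => intro cs; simp [pvSL]
  | succ n ih =>
    intro cs
    rw [pvSL_succ, List.getLast?_cons_cons, ih (cs + 1048576)]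
    push_cast; ring

-- ===== VERDICT (by name: the statement is the Claim_ definition above) =====
theorem GetFileChunks_py_spec : Claim_equal_GetFileChunks_py := by
  intro FS _
  show GetFileChunks_py FS = GetFileChunks_py_alt FS
  unfold GetFileChunks_py GetFileChunks_py_alt
  by_cases hbig : (4718592 : Int) < FS
  · -- big case: all ramp boundaries kept, steady tail present
    have hfilter : pvRAMP.filter (fun b => decide (b < FS)) = pvRAMP :=
      List.filter_eq_self.mpr (by intro b hb; fin_cases hb <;> simp <;> omega)
    have hNb := (PySem.Int.floordiv_eq_iff_of_pos
      (a := FS - 4718593) (b := 1048576) (q := PySem.Int.floordiv (FS - 4718593) 1048576)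
      (by omega)).mp rfl
    set N := PySem.Int.floordiv (FS - 4718593) 1048576 with hNdef
    have hN0 : 0 ≤ N := by nlinarith [hNb.1, hNb.2]
    obtain ⟨n, hn⟩ : ∃ n : Nat, N = n := ⟨N.toNat, (Int.toNat_of_nonneg hN0).symm⟩
    have hmap : (PySem.List.pyRange 0 N 1).map (fun j => 4718592 + 1048576 * (j + 1)) =
        pvSL 4718592 n := by
      rw [show PySem.List.pyRange 0 N 1 = PySem.List.pyRange 0 N from rfl,
        PySem.List.pyRange_one]
      unfold pvSL
      rw [show (N - 0).toNat = n by omega]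
      simp only [List.map_map]
      exact List.map_congr_left fun k _ => by simp [Function.comp]
    simp only [if_pos hbig, hfilter, hmap]
    simp only [pvRAMP, List.cons_append, List.nil_append]
    rw [pvALoop_step (by omega)]; norm_num
    rw [pvALoop_step (by omega)]; norm_num
    rw [pvALoop_step (by omega)]; norm_num
    rw [pvALoop_step (by omega)]; norm_num
    rw [pvALoop_step (by omega)]; norm_num
    rw [pvALoop_step (by omega)]; norm_num
    rw [pvALoop_step (by omega)]; norm_num
    rw [pvALoop_step (by omega)]; norm_num
    rw [pvALoop_steady FS n 4718592 (by omega) (by omega)]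
    rw [pvZipSteady n 4718592, pvLastSteady n 4718592]
  · -- small case: no steady tail; interval analysis on FS against the ramp boundaries
    have hsmall : ¬ (4718592 : Int) < FS := hbig
    simp only [if_neg hsmall, pvRAMP]
    by_cases h1 : (131072 : Int) < FS
    · by_cases h2 : (393216 : Int) < FS
      · by_cases h3 : (786432 : Int) < FS
        · by_cases h4 : (1310720 : Int) < FS
          · by_cases h5 : (1966080 : Int) < FS
            · by_cases h6 : (2752512 : Int) < FS
              · by_cases h7 : (3670016 : Int) < FS
                · -- 3670016 < FS ≤ 4718592 : 7 ramp chunks + remainder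
                  rw [pvALoop_step (by omega)]; norm_num
                  rw [pvALoop_step (by omega)]; norm_num
                  rw [pvALoop_step (by omega)]; norm_num
                  rw [pvALoop_step (by omega)]; norm_num
                  rw [pvALoop_step (by omega)]; norm_num
                  rw [pvALoop_step (by omega)]; norm_num
                  rw [pvALoop_step (by omega)]; norm_num
                  rw [pvALoop_stop (by omega)]
                  simp [h1, h2, h3, h4, h5, h6, h7, hsmall]
                · rw [pvALoop_step (by omega)]; norm_num
                  rw [pvALoop_step (by omega)]; norm_num
                  rw [pvALoop_step (by omega)]; norm_num
                  rw [pvALoop_step (by omega)]; norm_num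
                  rw [pvALoop_step (by omega)]; norm_num
                  rw [pvALoop_step (by omega)]; norm_num
                  rw [pvALoop_stop (by omega)]
                  simp [h1, h2, h3, h4, h5, h6, h7,
                    show ¬ (4718592:Int) < FS from hsmall]
              · rw [pvALoop_step (by omega)]; norm_num
                rw [pvALoop_step (by omega)]; norm_num
                rw [pvALoop_step (by omega)]; norm_num
                rw [pvALoop_step (by omega)]; norm_num
                rw [pvALoop_step (by omega)]; norm_num
                rw [pvALoop_stop (by omega)]
                simp [h1, h2, h3, h4, h5, h6,
                  show ¬ (3670016:Int) < FS by omega, show ¬ (4718592:Int) < FS from hsmall]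
            · rw [pvALoop_step (by omega)]; norm_num
              rw [pvALoop_step (by omega)]; norm_num
              rw [pvALoop_step (by omega)]; norm_num
              rw [pvALoop_step (by omega)]; norm_num
              rw [pvALoop_stop (by omega)]
              simp [h1, h2, h3, h4, h5,
                show ¬ (2752512:Int) < FS by omega, show ¬ (3670016:Int) < FS by omega,
                show ¬ (4718592:Int) < FS from hsmall]
          · rw [pvALoop_step (by omega)]; norm_num
            rw [pvALoop_step (by omega)]; norm_num
            rw [pvALoop_step (by omega)]; norm_num
            rw [pvALoop_stop (by omega)]
            simp [h1, h2, h3, h4,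
              show ¬ (1966080:Int) < FS by omega, show ¬ (2752512:Int) < FS by omega,
              show ¬ (3670016:Int) < FS by omega, show ¬ (4718592:Int) < FS from hsmall]
        · rw [pvALoop_step (by omega)]; norm_num
          rw [pvALoop_step (by omega)]; norm_num
          rw [pvALoop_stop (by omega)]
          simp [h1, h2, h3,
            show ¬ (1310720:Int) < FS by omega, show ¬ (1966080:Int) < FS by omega,
            show ¬ (2752512:Int) < FS by omega, show ¬ (3670016:Int) < FS by omega,
            show ¬ (4718592:Int) < FS from hsmall]
      · rw [pvALoop_step (by omega)]; norm_num
        rw [pvALoop_stop (by omega)]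
        simp [h1, h2,
          show ¬ (786432:Int) < FS by omega, show ¬ (1310720:Int) < FS by omega,
          show ¬ (1966080:Int) < FS by omega, show ¬ (2752512:Int) < FS by omega,
          show ¬ (3670016:Int) < FS by omega, show ¬ (4718592:Int) < FS from hsmall]
    · rw [pvALoop_stop (by omega)]
      simp [h1,
        show ¬ (393216:Int) < FS by omega, show ¬ (786432:Int) < FS by omega,
        show ¬ (1310720:Int) < FS by omega, show ¬ (1966080:Int) < FS by omega,
        show ¬ (2752512:Int) < FS by omega, show ¬ (3670016:Int) < FS by omega,
        show ¬ (4718592:Int) < FS from hsmall]
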